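-- pv_equiv track=rewrite | github.com/i4/idem-protocol | scripts/analysis/bench/refit.py | parse_folder_name
-- ===== SOURCE A (Python) =====
-- from typing import Tuple, Iterable, Optional, List
--
-- def parse_folder_name(name: str) -> Tuple[Optional[str], int]:
--     name_chunks = name.split("-refit-", 1)
--     if len(name_chunks) < 2:
--         return None, 0
--
--     # expected structure: <scenario>-<clients>-<duration>
--     # but also accept <scenario>-<clients>-<scenario2>-<duration>
--     chunks = name_chunks[1].split("-")[:-1]
--     client_count = 0
--     client_idx = -1
--     for i in reversed(range(len(chunks))):
--         try:
--             client_count = int(chunks[i])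
--             client_idx = i
--             break
--         except ValueError:
--             pass
--
--     if client_idx >= 0:
--         del chunks[client_idx]
--     scenario = "-".join(chunks)
--
--     return scenario, client_count
-- ===== SOURCE B (Python) =====
-- def _strip_count(chunks):
--     # Remove the rightmost int()-parseable chunk, returning (remaining chunks, its value).
--     if not chunks:
--         return [], 0
--     last = chunks[-1]
--     try:
--         return chunks[:-1], int(last)
--     except ValueError:
--         rest, count = _strip_count(chunks[:-1])
--         return rest + [last], count
--
--
-- def parse_folder_name(name):
--     parts = name.split("-refit-", 1)
--     if len(parts) < 2:
--         return None, 0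
--     rest, count = _strip_count(parts[1].split("-")[:-1])
--     return "-".join(rest), count
-- ===== Notes on version B (the rewrite author's own statement) =====
-- stated objective: alternative
-- what changed: Replaces the reverse index scan with break plus in-place del by a recursion from the right that strips the rightmost int()-parseable chunk while rebuilding the remaining list, so no index bookkeeping or mutation.
import Mathlib
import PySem

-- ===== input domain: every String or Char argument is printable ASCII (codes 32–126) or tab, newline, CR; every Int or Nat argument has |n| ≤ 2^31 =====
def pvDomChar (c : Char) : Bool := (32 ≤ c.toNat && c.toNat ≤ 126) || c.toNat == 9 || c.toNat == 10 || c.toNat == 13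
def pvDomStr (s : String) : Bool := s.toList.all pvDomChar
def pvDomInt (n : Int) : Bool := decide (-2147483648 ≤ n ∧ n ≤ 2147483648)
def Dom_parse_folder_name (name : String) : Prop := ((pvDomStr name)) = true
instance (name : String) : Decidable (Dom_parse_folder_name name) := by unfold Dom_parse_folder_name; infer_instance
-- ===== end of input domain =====

-- B replaces A's reverse index scan with break + del by a direct recursion that strips
-- the rightmost int()-parseable chunk while rebuilding the list (objective: alternative).

-- ===== PORT A =====
-- A's loop `for i in reversed(range(len(chunks))): try int(chunks[i]); break` with state
-- (client_count, client_idx) initialised to (0, -1): recursion counting the index down.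
def pfnFindA (chunks : List (List Char)) : Nat → Int × Int
  | 0 => (0, -1)
  | i + 1 =>
    match PySem.Int.ofChars? (chunks.getD i []) with   -- int(chunks[i]), ValueError = none
    | some v => (v, (i : Int))                          -- assignment then break
    | none => pfnFindA chunks i                         -- pass

def parse_folder_name (name : String) : Option String × Int :=
  match PySem.Str.splitMax? name "-refit-" 1 with      -- name.split("-refit-", 1); sep ≠ "" so never none
  | none => (none, 0)
  | some name_chunks =>
    if name_chunks.length < 2 then (none, 0)
    else
      let chunks := PySem.List.slice (PySem.Chars.splitOn (name_chunks.getD 1 "").toList ['-']) none (some (-1))  -- name_chunks[1].split("-")[:-1]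
      let r := pfnFindA chunks chunks.length
      let chunks2 := if r.2 ≥ 0 then chunks.eraseIdx r.2.toNat else chunks  -- del chunks[client_idx]
      (some (String.ofList (PySem.Chars.join ['-'] chunks2)), r.1)              -- "-".join(chunks)

-- ===== PORT B =====
-- _strip_count: recursion from the right; chunks[-1] = getLast, chunks[:-1] = dropLast.
def pfnStrip (chunks : List (List Char)) : List (List Char) × Int :=
  if h : chunks = [] then ([], 0)
  else
    let last := chunks.getLast h
    match PySem.Int.ofChars? last with                  -- int(last), ValueError = none
    | some v => (chunks.dropLast, v)
    | none =>
      let r := pfnStrip chunks.dropLast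
      (r.1 ++ [last], r.2)
  termination_by chunks.length
  decreasing_by
    have := List.length_pos_iff.mpr h
    simp [List.length_dropLast]; omega

def parse_folder_name_alt (name : String) : Option String × Int :=
  match PySem.Str.splitMax? name "-refit-" 1 with      -- name.split("-refit-", 1)
  | none => (none, 0)
  | some parts =>
    if parts.length < 2 then (none, 0)
    else
      let r := pfnStrip ((PySem.Chars.splitOn (parts.getD 1 "").toList ['-']).dropLast)  -- [:-1] = dropLast (PySem.List.slice_to_neg_one)
      (some (String.ofList (PySem.Chars.join ['-'] r.1)), r.2)

-- ===== PRECONDITION & SPEC =====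
def Spec_parse_folder_name (name : String) (out : Option String × Int) : Prop := out = parse_folder_name_alt name
instance (name : String) (out : Option String × Int) : Decidable (Spec_parse_folder_name name out) := by unfold Spec_parse_folder_name; infer_instance

-- ===== CLAIM (what is proved, stated in full; the proofs are below) =====
def Claim_equal_parse_folder_name : Prop := ∀ (name : String), Dom_parse_folder_name name → Spec_parse_folder_name name (parse_folder_name name)

-- ===== LEMMAS AND PROOFS =====

lemma pfnFindA_snd_bounds (chunks : List (List Char)) (i : Nat) :
    -1 ≤ (pfnFindA chunks i).2 ∧ (pfnFindA chunks i).2 < (i : Int) := by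
  induction i with
  | zero => simp [pfnFindA]
  | succ i ih =>
    simp only [pfnFindA]
    cases PySem.Int.ofChars? (chunks.getD i []) with
    | some v => constructor <;> simp
    | none => exact ⟨ih.1, by have := ih.2; push_cast; omega⟩

lemma pfnFindA_append (xs : List (List Char)) (x : List Char) (i : Nat) (h : i ≤ xs.length) :
    pfnFindA (xs ++ [x]) i = pfnFindA xs i := by
  induction i with
  | zero => rfl
  | succ i ih =>
    have hi : i < xs.length := by omega
    have : (xs ++ [x]).getD i [] = xs.getD i [] := by
      simp [List.getD_eq_getElem?_getD, List.getElem?_append_left hi]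
    simp only [pfnFindA, this]
    cases PySem.Int.ofChars? (xs.getD i []) <;> simp [ih (by omega)]

lemma strip_eq_find (chunks : List (List Char)) :
    pfnStrip chunks =
      ((if (pfnFindA chunks chunks.length).2 ≥ 0 then
          chunks.eraseIdx (pfnFindA chunks chunks.length).2.toNat
        else chunks),
       (pfnFindA chunks chunks.length).1) := by
  induction chunks using List.reverseRecOn with
  | nil => simp [pfnStrip, pfnFindA]
  | append_singleton xs x ih =>
    rw [pfnStrip]
    have hne : xs ++ [x] ≠ [] := by simp
    have hlast : (xs ++ [x]).getLast hne = x := by simp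
    have hlen : (xs ++ [x]).length = xs.length + 1 := by simp
    simp only [dif_neg hne, hlast, hlen, pfnFindA]
    have hgd : (xs ++ [x]).getD xs.length [] = x := by
      simp [List.getD_eq_getElem?_getD]
    rw [hgd]
    cases hx : PySem.Int.ofChars? x with
    | some v =>
      have hge : ((xs.length : Int)) ≥ 0 := by positivity
      simp only [if_pos hge, Int.toNat_natCast]
      rw [List.eraseIdx_append_of_length_le le_rfl]
      simp
    | none =>
      rw [pfnFindA_append xs x xs.length le_rfl]
      have hb := pfnFindA_snd_bounds xs xs.length
      rw [List.dropLast_concat, ih]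
      by_cases hge : (pfnFindA xs xs.length).2 ≥ 0
      · rw [if_pos hge, if_pos hge]
        have hlt : (pfnFindA xs xs.length).2.toNat < xs.length := by omega
        rw [List.eraseIdx_append_of_lt_length hlt]
      · rw [if_neg hge, if_neg hge]

-- ===== VERDICT (by name: the statement is the Claim_ definition above) =====
theorem parse_folder_name_spec : Claim_equal_parse_folder_name := by
  intro name _
  unfold Spec_parse_folder_name parse_folder_name parse_folder_name_alt
  cases h : PySem.Str.splitMax? name "-refit-" 1 with
  | none => rfl
  | some parts =>
    by_cases hl : parts.length < 2
    · simp [hl]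
    · simp only [if_neg hl]
      rw [PySem.List.slice_to_neg_one, strip_eq_find]
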